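-- pv_equiv track=rewrite | github.com/seokjohn/dbgStackViewer | stack_viewer/splitter/tmux.py | _build_address_lines
-- ===== SOURCE A (Python) =====
-- def _build_address_lines(address_lines: list[str], byte_box_line_count: int) -> list[str]:
--     if byte_box_line_count <= 0:
--         return list(address_lines)
--
--     lines = [""] * byte_box_line_count
--     for index, address in enumerate(address_lines):
--         target_index = index + 1
--         if target_index >= byte_box_line_count - 1:
--             target_index = min(byte_box_line_count - 2, target_index)
--         if 0 <= target_index < len(lines):
--             lines[target_index] = address
--     return lines
-- ===== SOURCE B (Python) =====
-- def _build_address_lines(address_lines: list[str], byte_box_line_count: int) -> list[str]: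
--     n = byte_box_line_count
--     if n <= 0:
--         return list(address_lines)
--     lines = [""] * n
--     cap = n - 2
--     m = len(address_lines)
--     if cap < 0 or m == 0:
--         return lines
--     if m >= cap:
--         # overflow: slots 1..cap-1 get the first cap-1 addresses, slot cap gets the last
--         k = max(cap - 1, 0)
--         lines[1:1 + k] = address_lines[:k]
--         lines[cap] = address_lines[-1]
--     else:
--         lines[1:1 + m] = address_lines
--     return lines
-- ===== Notes on version B (the rewrite author's own statement) =====
-- stated objective: faster
-- what changed: Replaces A's per-element loop with clamped overwrite (where every overflow element repeatedly rewrites the cap slot) by direct region placement that writes each final slot exactly once: one slice assignment for the non-overflow region plus a single assignment of the cap slot to the last address.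
import Mathlib
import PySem

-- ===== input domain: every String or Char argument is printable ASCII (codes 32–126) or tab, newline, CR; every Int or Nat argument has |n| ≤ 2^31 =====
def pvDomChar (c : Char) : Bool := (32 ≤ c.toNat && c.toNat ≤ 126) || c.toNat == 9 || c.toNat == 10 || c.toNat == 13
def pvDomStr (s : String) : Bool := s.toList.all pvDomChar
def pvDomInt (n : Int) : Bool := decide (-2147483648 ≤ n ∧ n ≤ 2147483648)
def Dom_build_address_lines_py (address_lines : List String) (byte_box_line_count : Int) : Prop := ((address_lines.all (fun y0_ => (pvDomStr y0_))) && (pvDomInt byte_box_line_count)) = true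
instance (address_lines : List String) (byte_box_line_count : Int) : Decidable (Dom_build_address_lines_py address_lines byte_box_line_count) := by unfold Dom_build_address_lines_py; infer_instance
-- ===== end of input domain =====

-- B replaces A's per-element clamped-overwrite loop by direct region placement (each final slot is
-- written exactly once, via slice assignment); measured constant-factor speedup.

-- ===== PORT A =====
-- literal transliteration of A's loop: enumerate + clamped overwrite via pySetD
def build_address_lines_py (address_lines : List String) (byte_box_line_count : Int) : List String :=
  if byte_box_line_count ≤ 0 then address_lines
  else
    (PySem.List.enumerate address_lines 0).foldl
      (fun lines ia =>
        let target_index : Int := ia.1 + 1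
        let target_index : Int :=
          if target_index ≥ byte_box_line_count - 1 then min (byte_box_line_count - 2) target_index
          else target_index
        if 0 ≤ target_index ∧ target_index < (lines.length : Int) then
          PySem.List.pySetD lines target_index ia.2
        else lines)
      (List.replicate byte_box_line_count.toNat "")

-- ===== PORT B =====
-- transliteration of Source B; the two slice assignments have matching lengths, so
-- lines[1:1+k] = addrs[:k] on lines = ['']*n is exactly "" :: take k ++ replicate (n-1-k) ""
def build_address_lines_py_alt (address_lines : List String) (byte_box_line_count : Int) : List String :=
  if byte_box_line_count ≤ 0 then address_lines
  else
    let n : Nat := byte_box_line_count.toNat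
    let cap : Int := byte_box_line_count - 2
    let m : Nat := address_lines.length
    if cap < 0 ∨ m = 0 then List.replicate n ""
    else if (m : Int) ≥ cap then
      let k : Nat := (max (cap - 1) 0).toNat
      PySem.List.pySetD
        ("" :: (address_lines.take k ++ List.replicate (n - 1 - k) "")) cap
        (PySem.List.pyGetD address_lines (-1) "")
    else
      "" :: (address_lines ++ List.replicate (n - 1 - m) "")

-- ===== PRECONDITION & SPEC =====
def Spec_build_address_lines_py (address_lines : List String) (byte_box_line_count : Int) (out : List String) : Prop := out = build_address_lines_py_alt address_lines byte_box_line_count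
instance (address_lines : List String) (byte_box_line_count : Int) (out : List String) : Decidable (Spec_build_address_lines_py address_lines byte_box_line_count out) := by unfold Spec_build_address_lines_py; infer_instance

-- ===== CLAIM (what is proved, stated in full; the proofs are below) =====
def Claim_equal_build_address_lines_py : Prop := ∀ (address_lines : List String) (byte_box_line_count : Int), Dom_build_address_lines_py address_lines byte_box_line_count → Spec_build_address_lines_py address_lines byte_box_line_count (build_address_lines_py address_lines byte_box_line_count)

-- ===== LEMMAS AND PROOFS =====

-- the slot A writes element number i to (i = enumerate index)
def pvSlot (n i : Int) : Int :=
  if i + 1 ≥ n - 1 then min (n - 2) (i + 1) else i + 1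

-- the value the LAST write to slot j leaves, processing addrs with enumerate start s
def pvLastW (n : Int) (s : Int) (addrs : List String) (j : Int) : Option String :=
  match addrs with
  | [] => none
  | a :: r => (pvLastW n (s + 1) r j).orElse (fun _ => if pvSlot n s = j then some a else none)

theorem pvSlot_eq_min (n i : Int) : pvSlot n i = min (i + 1) (n - 2) := by
  unfold pvSlot; split_ifs with h <;> omega

theorem pvFold_length (n : Int) (addrs : List String) (s : Int) (L : List String) :
    ((PySem.List.enumerate addrs s).foldl
      (fun lines ia =>
        let t : Int := ia.1 + 1
        let t : Int := if t ≥ n - 1 then min (n - 2) t else t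
        if 0 ≤ t ∧ t < (lines.length : Int) then PySem.List.pySetD lines t ia.2 else lines)
      L).length = L.length := by
  induction addrs generalizing s L with
  | nil => simp [PySem.List.enumerate_nil]
  | cons a r ih =>
    rw [PySem.List.enumerate_cons, List.foldl_cons]
    rw [ih]
    dsimp only
    split_ifs with h1 h2 h3
    · rw [PySem.List.pySetD_of_nonneg _ _ h2.1, List.length_set]
    · rfl
    · rw [PySem.List.pySetD_of_nonneg _ _ h3.1, List.length_set]
    · rfl

theorem pvFold_get (n : Int) (addrs : List String) (s : Int) (L : List String)
    (hL : (L.length : Int) = n) (hs : 0 ≤ s) (j : Nat) (hj : j < L.length) :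
    ((PySem.List.enumerate addrs s).foldl
      (fun lines ia =>
        let t : Int := ia.1 + 1
        let t : Int := if t ≥ n - 1 then min (n - 2) t else t
        if 0 ≤ t ∧ t < (lines.length : Int) then PySem.List.pySetD lines t ia.2 else lines)
      L)[j]? = (pvLastW n s addrs j).orElse (fun _ => L[j]?) := by
  induction addrs generalizing s L with
  | nil => simp [PySem.List.enumerate_nil, pvLastW]
  | cons a r ih =>
    rw [PySem.List.enumerate_cons, List.foldl_cons]
    -- compute the one step
    set L1 := (fun lines : List String => fun ia : Int × String =>
        let t : Int := ia.1 + 1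
        let t : Int := if t ≥ n - 1 then min (n - 2) t else t
        if 0 ≤ t ∧ t < (lines.length : Int) then PySem.List.pySetD lines t ia.2 else lines) L (s, a)
      with hL1
    have hlen1 : L1.length = L.length := by
      rw [hL1]; dsimp only; split_ifs with h1 h2 h3
      · rw [PySem.List.pySetD_of_nonneg _ _ h2.1, List.length_set]
      · rfl
      · rw [PySem.List.pySetD_of_nonneg _ _ h3.1, List.length_set]
      · rfl
    rw [ih (s+1) L1 (by rw [hlen1]; exact hL) (by omega) (by rw [hlen1]; exact hj)]
    have hL1' : L1 = if 0 ≤ pvSlot n s ∧ pvSlot n s < (L.length : Int) then PySem.List.pySetD L (pvSlot n s) a else L := hL1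
    have hget1 : L1[j]? = ((fun _ : Unit => if pvSlot n s = (j : Int) then some a else none) ()).orElse (fun _ => L[j]?) := by
      rw [hL1']
      by_cases hsj : pvSlot n s = (j : Int)
      · rw [if_pos (by constructor <;> omega)]
        rw [PySem.List.pySetD_of_nonneg _ _ (by omega)]
        have ht : (pvSlot n s).toNat = j := by omega
        rw [ht, List.getElem?_set_self hj]
        show _ = (if pvSlot n s = (j : Int) then some a else none).orElse (fun _ => L[j]?)
        rw [if_pos hsj]
        rfl
      · show _ = (if pvSlot n s = (j : Int) then some a else none).orElse (fun _ => L[j]?)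
        rw [if_neg hsj]
        split_ifs with hg
        · rw [PySem.List.pySetD_of_nonneg _ _ hg.1, List.getElem?_set_ne (by omega)]
          rfl
        · rfl
    rw [hget1, pvLastW]
    cases pvLastW n (s + 1) r j <;> rfl


-- slots above the cap are never written
theorem pvLastW_gt (n : Int) (addrs : List String) (s : Int) (hs : 0 ≤ s)
    (j : Nat) (hj : n - 2 < (j : Int)) :
    pvLastW n s addrs j = none := by
  induction addrs generalizing s with
  | nil => rfl
  | cons a r ih =>
    rw [pvLastW, ih (s+1) (by omega)]
    have : pvSlot n s ≠ (j : Int) := by unfold pvSlot; split_ifs <;> omega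
    simp [this, Option.orElse]

-- pvLastW below the cap slot: only the single in-range write s' = j-1 hits slot j
theorem pvLastW_lt (n : Int) (hn : 2 ≤ n) (addrs : List String) (s : Int) (hs : 0 ≤ s)
    (j : Nat) (hj : (j : Int) < n - 2) :
    pvLastW n s addrs j = if s ≤ (j : Int) - 1 then addrs[((j : Int) - 1 - s).toNat]? else none := by
  induction addrs generalizing s with
  | nil => simp [pvLastW]
  | cons a r ih =>
    rw [pvLastW, ih (s+1) (by omega)]
    have hslot := pvSlot_eq_min n s
    by_cases he : s = (j : Int) - 1
    · rw [if_neg (show ¬ (s + 1 ≤ (j : Int) - 1) by omega),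
        if_pos (show s ≤ (j : Int) - 1 by omega),
        if_pos (show pvSlot n s = (j : Int) by omega)]
      have h0 : ((j : Int) - 1 - s).toNat = 0 := by omega
      rw [h0]
      rfl
    · have h2 : ¬ pvSlot n s = (j : Int) := by omega
      by_cases hlt : s + 1 ≤ (j : Int) - 1
      · rw [if_pos hlt, if_pos (show s ≤ (j : Int) - 1 by omega), if_neg h2]
        have h3 : ((j : Int) - 1 - s).toNat = ((j : Int) - 1 - (s+1)).toNat + 1 := by omega
        rw [h3, List.getElem?_cons_succ]
        cases r[((j : Int) - 1 - (s+1)).toNat]? <;> rfl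
      · rw [if_neg hlt, if_neg (show ¬ s ≤ (j : Int) - 1 by omega), if_neg h2]
        rfl

-- pvLastW at the cap slot: the last element wins iff the list reaches the cap
theorem pvLastW_cap (n : Int) (hn : 2 ≤ n) (addrs : List String) (s : Int) (hs : 0 ≤ s) :
    pvLastW n s addrs ((n - 2).toNat) =
      if addrs ≠ [] ∧ n - 2 ≤ s + addrs.length then addrs.getLast? else none := by
  induction addrs generalizing s with
  | nil => simp [pvLastW]
  | cons a r ih =>
    rw [pvLastW, ih (s+1) (by omega)]
    have hslot := pvSlot_eq_min n s
    cases r with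
    | nil =>
      rw [if_neg (show ¬ (([] : List String) ≠ [] ∧ n - 2 ≤ s + 1 + (([] : List String).length : Int)) from fun h => h.1 rfl)]
      by_cases hc : n - 2 ≤ s + 1
      · rw [if_pos (show pvSlot n s = (((n - 2).toNat : Nat) : Int) by omega),
          if_pos (show ([a] : List String) ≠ [] ∧ n - 2 ≤ s + (([a] : List String).length : Int) from
            ⟨by simp, by simp only [List.length_cons, List.length_nil]; push_cast; omega⟩)]
        rfl
      · rw [if_neg (show ¬ pvSlot n s = (((n - 2).toNat : Nat) : Int) by omega),
          if_neg (show ¬ (([a] : List String) ≠ [] ∧ n - 2 ≤ s + (([a] : List String).length : Int)) from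
            fun h => by have := h.2; simp only [List.length_cons, List.length_nil] at this; push_cast at this; omega)]
        rfl
    | cons b r' =>
      by_cases hc : n - 2 ≤ s + 1 + ((b :: r').length : Int)
      · rw [if_pos (show (b :: r') ≠ [] ∧ n - 2 ≤ s + 1 + ((b :: r').length : Int) from ⟨by simp, hc⟩),
          if_pos (show (a :: b :: r') ≠ [] ∧ n - 2 ≤ s + ((a :: b :: r').length : Int) from
            ⟨by simp, by simp only [List.length_cons] at hc ⊢; push_cast at hc ⊢; omega⟩)]
        rw [List.getLast?_cons_cons]
        rcases Option.isSome_iff_exists.mp (List.getLast?_isSome.mpr (by simp : (b :: r') ≠ [])) with ⟨v, hv⟩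
        rw [hv]
        rfl
      · rw [if_neg (fun h : (b :: r') ≠ [] ∧ n - 2 ≤ s + 1 + ((b :: r').length : Int) => hc h.2),
          if_neg (show ¬ ((a :: b :: r') ≠ [] ∧ n - 2 ≤ s + ((a :: b :: r').length : Int)) from
            fun h => by have := h.2; simp only [List.length_cons] at hc this; push_cast at hc this; omega),
          if_neg (show ¬ pvSlot n s = (((n - 2).toNat : Nat) : Int) by push_cast at hc; omega)]
        rfl

theorem pvAlt_length (addrs : List String) (n : Int) (hn : 1 ≤ n) :
    (build_address_lines_py_alt addrs n).length = n.toNat := by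
  unfold build_address_lines_py_alt
  rw [if_neg (by omega)]
  dsimp only
  split_ifs with h1 h2
  · simp
  · rw [PySem.List.pySetD_of_nonneg _ _ (by omega)]
    simp only [List.length_set, List.length_cons, List.length_append, List.length_take,
      List.length_replicate]
    omega
  · simp only [List.length_cons, List.length_append, List.length_replicate]
    omega

-- ===== VERDICT (by name: the statement is the Claim_ definition above) =====
theorem build_address_lines_py_spec : Claim_equal_build_address_lines_py := by
  intro addrs n _
  unfold Spec_build_address_lines_py
  by_cases hn : n ≤ 0
  · unfold build_address_lines_py build_address_lines_py_alt
    rw [if_pos hn, if_pos hn]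
  · push_neg at hn
    have hlenA : (build_address_lines_py addrs n).length = n.toNat := by
      unfold build_address_lines_py
      rw [if_neg (by omega), pvFold_length n addrs 0 _]
      simp
    have hlenB := pvAlt_length addrs n hn
    apply List.ext_getElem?
    intro j
    by_cases hj : j < n.toNat
    swap
    · rw [List.getElem?_eq_none (by omega), List.getElem?_eq_none (by omega)]
    have hA : (build_address_lines_py addrs n)[j]? =
        (pvLastW n 0 addrs j).orElse (fun _ => some "") := by
      unfold build_address_lines_py
      rw [if_neg (by omega)]
      rw [pvFold_get n addrs 0 _ (by simp [List.length_replicate]; omega) le_rfl j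
        (by simp [List.length_replicate, hj])]
      congr 1
      funext _
      rw [List.getElem?_replicate, if_pos hj]
    rw [hA]
    unfold build_address_lines_py_alt
    rw [if_neg (by omega)]
    dsimp only
    by_cases h1 : n - 2 < 0 ∨ addrs.length = 0
    · rw [if_pos h1, List.getElem?_replicate, if_pos hj]
      rcases h1 with h1 | h1
      · have hj2 : n - 2 < (j : Int) := by omega
        rw [pvLastW_gt n addrs 0 le_rfl j hj2]; rfl
      · have : addrs = [] := List.length_eq_zero_iff.mp h1
        subst this; rfl
    · rw [if_neg h1]
      push_neg at h1
      have hn2 : 2 ≤ n := by omega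
      have hm : addrs ≠ [] := fun h => h1.2 (by simp [h])
      have hm1 : 1 ≤ addrs.length := by omega
      by_cases h2 : (addrs.length : Int) ≥ n - 2
      · -- overflow branch
        rw [if_pos h2, PySem.List.pySetD_of_nonneg _ _ (by omega),
          PySem.List.pyGetD_neg_one _ _ hm]
        set k : Nat := (max (n - 2 - 1) 0).toNat with hk
        have hkm : k ≤ addrs.length := by omega
        have htk : (addrs.take k).length = k := by simp [List.length_take]; omega
        by_cases hjc : (j : Int) = n - 2
        · have hjn : (n - 2).toNat = j := by omega
          rw [show (n - 2).toNat = j from hjn, List.getElem?_set_self (by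
            simp only [List.length_cons, List.length_append, htk, List.length_replicate]; omega)]
          rw [show j = (n - 2).toNat from hjn.symm, pvLastW_cap n hn2 addrs 0 le_rfl,
            if_pos ⟨hm, by omega⟩, List.getLast?_eq_some_getLast hm]
          rfl
        · rw [List.getElem?_set_ne (by omega)]
          by_cases hjlt : (j : Int) < n - 2
          · by_cases hj0 : j = 0
            · subst hj0
              rw [pvLastW_lt n hn2 addrs 0 le_rfl 0 (by push_cast; omega), if_neg (by omega)]
              rfl
            · have hj1 : 1 ≤ j := by omega
              rw [pvLastW_lt n hn2 addrs 0 le_rfl j hjlt, if_pos (by omega)]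
              have hjj : ((j : Int) - 1 - 0).toNat = j - 1 := by omega
              rw [hjj]
              rcases Nat.exists_eq_add_of_le hj1 with ⟨j', hj'⟩
              have hj'' : j = j' + 1 := by omega
              subst hj''
              simp only [List.getElem?_cons_succ, Nat.add_sub_cancel]
              have hjk : j' < k := by omega
              rw [List.getElem?_append_left (by rw [htk]; exact hjk),
                List.getElem?_take_of_lt hjk]
              have hjm : j' < addrs.length := by omega
              rw [List.getElem?_eq_getElem hjm]
              rfl
          · -- j above the cap (j = n-1): both sides ""
            have hjgt : n - 2 < (j : Int) := by omega
            rw [pvLastW_gt n addrs 0 le_rfl j hjgt]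
            have hj1 : 1 ≤ j := by omega
            rcases Nat.exists_eq_add_of_le hj1 with ⟨j', hj'⟩
            have hj'' : j = j' + 1 := by omega
            subst hj''
            simp only [List.getElem?_cons_succ]
            have hgek : k ≤ j' := by omega
            rw [List.getElem?_append_right (by rw [htk]; exact hgek), htk,
              List.getElem?_replicate, if_pos (by omega)]
            rfl
      · -- short branch: each address at its own slot
        rw [if_neg h2]
        have hmlt : (addrs.length : Int) < n - 2 := by omega
        by_cases hj0 : j = 0
        · subst hj0
          rw [pvLastW_lt n hn2 addrs 0 le_rfl 0 (by push_cast; omega), if_neg (by omega)]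
          rfl
        · have hj1 : 1 ≤ j := by omega
          rcases Nat.exists_eq_add_of_le hj1 with ⟨j', hj'⟩
          have hj'' : j = j' + 1 := by omega
          subst hj''
          simp only [List.getElem?_cons_succ]
          by_cases hjlt : ((j' + 1 : Nat) : Int) < n - 2
          · rw [pvLastW_lt n hn2 addrs 0 le_rfl (j' + 1) hjlt, if_pos (by push_cast; omega)]
            have hjj : (((j' + 1 : Nat) : Int) - 1 - 0).toNat = j' := by omega
            rw [hjj]
            by_cases hjm : j' < addrs.length
            · rw [List.getElem?_append_left hjm, List.getElem?_eq_getElem hjm]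
              rfl
            · push_neg at hjm
              rw [List.getElem?_append_right hjm, List.getElem?_replicate,
                if_pos (by omega), List.getElem?_eq_none (by omega)]
              rfl
          · -- j at or above the cap: nothing written, replicate region
            have hcapOrGt : pvLastW n 0 addrs (((j' + 1 : Nat) : Int)) = none := by
              by_cases hje : ((j' + 1 : Nat) : Int) = n - 2
              · rw [show ((j' + 1 : Nat) : Int) = (((n - 2).toNat : Nat) : Int) by omega,
                  pvLastW_cap n hn2 addrs 0 le_rfl,
                  if_neg (show ¬ (addrs ≠ [] ∧ n - 2 ≤ 0 + (addrs.length : Int)) from fun h => by omega)]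
              · exact pvLastW_gt n addrs 0 le_rfl (j' + 1) (by omega)
            rw [hcapOrGt]
            have hjm : addrs.length ≤ j' := by omega
            rw [List.getElem?_append_right hjm, List.getElem?_replicate, if_pos (by omega)]
            rfl
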